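-- pv_equiv track=rewrite | github.com/JMJAJ/GOP3-blackjack-bot | blackjack.py | get_player_key_for_strategy
-- ===== SOURCE A (Python) =====
-- def card_num_from_card_name(card_name):
--     if not card_name or len(card_name) < 2: return 0
--     rank = card_name[1]
--     if rank in ["t", "j", "q", "k"]: return 10
--     elif rank == "a": return 11 # Ace is initially 11
--     else:
--         try: return int(rank)
--         except ValueError: return 0
--
-- def card_num_str_from_card_name(card_name):
--     if not card_name or len(card_name) < 2: return ""
--     rank = card_name[1]
--     if rank in ["t", "j", "q", "k"]: return "10"
--     elif rank == "a": return "A"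
--     else: return rank
--
-- def calculate_hand_value(card_names):
--     """Calculates the best value of a hand, handling Aces."""
--     total = 0
--     num_aces = 0
--     for name in card_names:
--         val = card_num_from_card_name(name)
--         if val == 11:
--             num_aces += 1
--         total += val
--     # Adjust for Aces if total > 21
--     while total > 21 and num_aces > 0:
--         total -= 10
--         num_aces -= 1
--     return total
--
-- def get_player_key_for_strategy(card_names):
--     """Determines the strategy lookup key (e.g., "16", "A,7", "8,8")."""
--     num_cards = len(card_names)
--     if num_cards == 0: return "" # Handle empty hand
--
--     if num_cards == 1: # If only one card (e.g., after a split, before second card dealt)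
--         val = card_num_from_card_name(card_names[0])
--         if val == 11: return "A" # Treat single Ace as "A"
--         return str(val)       # Treat single numeric card as its value
--
--     # Calculate values and string representations
--     hand_value = calculate_hand_value(card_names) # This already handles Aces correctly for total
--     num_aces_in_hand = sum(1 for name in card_names if card_num_from_card_name(name) == 11)
--
--     # Pair check (initial deal or after split if two cards)
--     if num_cards == 2:
--         val1_str = card_num_str_from_card_name(card_names[0])
--         val2_str = card_num_str_from_card_name(card_names[1])
--
--         # Ensure consistent order for pairs like "2,A" vs "A,2" -> should be "A,2"
--         # Or for "2,2", "A,A"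
--         if val1_str == val2_str:
--             return f"{val1_str},{val1_str}"
--         # If not a pair, it might be a soft total or hard total for 2 cards
--         # The soft/hard logic below will handle it.
--
--     # Soft total check:
--     # A hand is "soft" if it contains an Ace that can be counted as 11 without busting.
--     # calculate_hand_value returns the highest possible score.
--     # If num_aces_in_hand > 0 and hand_value > (sum of non-Aces + num_aces_in_hand * 1),
--     # it means at least one Ace is counted as 11.
--     if num_aces_in_hand > 0:
--         sum_of_non_aces = sum(card_num_from_card_name(name) for name in card_names if card_num_from_card_name(name) != 11)
--
--         # If hand_value is greater than sum_of_non_aces + total number of aces (counted as 1 each)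
--         # then at least one ace must be counted as 11.
--         if hand_value > (sum_of_non_aces + num_aces_in_hand):
--             # The "other card value" for "A,X" is hand_value - 11
--             other_card_val = hand_value - 11
--             return f"A,{other_card_val}"
--
--     # Hard total or two cards that are not a pair and not a soft total (e.g. 5,T -> 15)
--     # Also, pairs that are not "A,A" (like "8,8") will be handled by CHEAT_SHEET if an entry exists
--     # otherwise they fall through to their sum (e.g. "8,8" -> "16" if no "8,8" entry)
--     if num_cards == 2: # Specific handling for two cards that are not pairs and not soft.
--         # Check if the pair is explicitly in CHEAT_SHEET (e.g., "2,2", "A,A")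
--         # This check is now more direct for pairs
--         str_c1 = card_num_str_from_card_name(card_names[0])
--         str_c2 = card_num_str_from_card_name(card_names[1])
--
--         # For pairs like "2,2", "8,8" (A,A is already covered if soft A,A or hard 2/12)
--         if str_c1 == str_c2: # This covers numeric pairs
--             return f"{str_c1},{str_c1}"
--
--         # For A,X non-pair like A,7
--         if str_c1 == "A": return f"A,{str_c2}"
--         if str_c2 == "A": return f"A,{str_c1}"
--         # For other two-card totals like 10,7 -> "17" (which is hand_value)
--         # or 2,3 -> "5"
--
--     return str(hand_value) # Default to hard total string
-- ===== SOURCE B (Python) =====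
-- def get_player_key_for_strategy(card_names):
--     # One pass: collect each card's rank string, hard value (ace=1) and ace flag;
--     # hand value by closed form instead of the while loop.
--     infos = []
--     hard = 0
--     aces = 0
--     for name in card_names:
--         if len(name) < 2:
--             s, v, ace = "", 0, False
--         else:
--             c = name[1]
--             if c in ("t", "j", "q", "k"):
--                 s, v, ace = "10", 10, False
--             elif c == "a":
--                 s, v, ace = "A", 1, True
--             else:
--                 try:
--                     v = int(c)
--                 except ValueError:
--                     v = 0
--                 s, ace = c, False
--         infos.append(s)
--         hard += v
--         aces += 1 if ace else 0
--     n = len(infos)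
--     if n == 0:
--         return ""
--     soft = aces > 0 and hard + 10 <= 21
--     value = hard + 10 if soft else hard
--     if n == 1:
--         return "A" if aces else str(value)
--     if n == 2 and infos[0] == infos[1]:
--         return f"{infos[0]},{infos[0]}"
--     if soft:
--         return f"A,{value - 11}"
--     return str(value)
-- ===== Notes on version B (the rewrite author's own statement) =====
-- stated objective: simpler
-- what changed: One pass computes each card's rank string, hard value (ace=1) and ace flag, replacing A's repeated helper calls per card and its ace-adjustment while-loop with a closed-form hand value and a flat early-return key chain.
-- intended difference: On two-card hands with no real ace ('a') whose second character is an uppercase 'A' on exactly one card, A returns a soft-style key 'A,<other rank>' although its own value helper counts that card as 0; B returns the hard-total string, the intended key since the hand contains no ace. — e.g. on get_player_key_for_strategy(["xA", "x7"]): A returns "A,7", B returns "7"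
import Mathlib
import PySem

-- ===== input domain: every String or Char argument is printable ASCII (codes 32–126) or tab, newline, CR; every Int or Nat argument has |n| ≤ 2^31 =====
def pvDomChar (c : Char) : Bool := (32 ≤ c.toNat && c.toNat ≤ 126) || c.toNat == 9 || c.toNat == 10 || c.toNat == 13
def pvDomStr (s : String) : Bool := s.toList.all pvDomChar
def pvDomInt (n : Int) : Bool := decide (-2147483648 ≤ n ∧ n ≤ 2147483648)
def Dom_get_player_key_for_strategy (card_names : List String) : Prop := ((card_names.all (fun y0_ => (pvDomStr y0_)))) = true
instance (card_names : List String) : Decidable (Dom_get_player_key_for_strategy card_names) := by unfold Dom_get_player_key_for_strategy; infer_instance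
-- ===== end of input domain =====

-- B replaces A's repeated helper calls and Ace while-loop with one pass per card and a
-- closed-form hand value; on hands with an uppercase-'A' second character A and B
-- intentionally differ (see D_ below).

-- ===== PORT A =====
-- card_num_from_card_name
def pvCardNum (name : List Char) : Int :=
  if name = [] ∨ PySem.List.len name < 2 then 0
  else
    match PySem.List.pyGet? name 1 with
    | none => 0
    | some c =>
      if c ∈ ['t', 'j', 'q', 'k'] then 10
      else if c = 'a' then 11
      else match PySem.Int.ofChars? [c] with
           | some n => n        -- try: int(rank)
           | none => 0          -- except ValueError

-- card_num_str_from_card_name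
def pvCardStr (name : List Char) : List Char :=
  if name = [] ∨ PySem.List.len name < 2 then []
  else
    match PySem.List.pyGet? name 1 with
    | none => []
    | some c =>
      if c ∈ ['t', 'j', 'q', 'k'] then ['1', '0']
      else if c = 'a' then ['A']
      else [c]

-- the while-loop of calculate_hand_value
def pvAdjust (total numAces : Int) : Int :=
  if 21 < total ∧ 0 < numAces then pvAdjust (total - 10) (numAces - 1) else total
termination_by numAces.toNat
decreasing_by omega

-- calculate_hand_value
def pvCalcHandValue (names : List (List Char)) : Int :=
  let st := names.foldl (fun (acc : Int × Int) nm =>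
    let v := pvCardNum nm
    let na := if v = 11 then acc.2 + 1 else acc.2
    (acc.1 + v, na)) (0, 0)
  pvAdjust st.1 st.2

-- get_player_key_for_strategy, on the List Char level
def pvKeyA (names : List (List Char)) : List Char :=
  let n := PySem.List.len names
  if n = 0 then []
  else if n = 1 then
    let v := pvCardNum (PySem.List.pyGetD names 0 [])
    if v = 11 then ['A'] else PySem.Int.toChars v
  else
    let hv := pvCalcHandValue names
    let numAces := (names.map (fun nm => if pvCardNum nm = 11 then (1 : Int) else 0)).sum
    if n = 2 ∧ pvCardStr (PySem.List.pyGetD names 0 []) = pvCardStr (PySem.List.pyGetD names 1 []) then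
      pvCardStr (PySem.List.pyGetD names 0 []) ++ ',' :: pvCardStr (PySem.List.pyGetD names 0 [])
    else if 0 < numAces ∧
        ((names.filter (fun nm => pvCardNum nm != 11)).map (fun nm => pvCardNum nm)).sum + numAces < hv then
      'A' :: ',' :: PySem.Int.toChars (hv - 11)
    else if n = 2 ∧ pvCardStr (PySem.List.pyGetD names 0 []) = pvCardStr (PySem.List.pyGetD names 1 []) then
      pvCardStr (PySem.List.pyGetD names 0 []) ++ ',' :: pvCardStr (PySem.List.pyGetD names 0 [])
    else if n = 2 ∧ pvCardStr (PySem.List.pyGetD names 0 []) = ['A'] then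
      'A' :: ',' :: pvCardStr (PySem.List.pyGetD names 1 [])
    else if n = 2 ∧ pvCardStr (PySem.List.pyGetD names 1 []) = ['A'] then
      'A' :: ',' :: pvCardStr (PySem.List.pyGetD names 0 [])
    else PySem.Int.toChars hv

def get_player_key_for_strategy (card_names : List String) : String :=
  String.ofList (pvKeyA (card_names.map String.toList))

-- ===== PORT B =====
-- per-card (rank string, hard value with ace = 1, is-ace flag), computed once
def pvRankInfo (name : List Char) : List Char × Int × Bool :=
  if PySem.List.len name < 2 then ([], 0, false)
  else
    match PySem.List.pyGet? name 1 with
    | none => ([], 0, false)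
    | some c =>
      if c ∈ ['t', 'j', 'q', 'k'] then (['1', '0'], 10, false)
      else if c = 'a' then (['A'], 1, true)
      else ([c], (match PySem.Int.ofChars? [c] with | some n => n | none => 0), false)

def pvKeyB (names : List (List Char)) : List Char :=
  let st := names.foldl (fun (acc : List (List Char) × Int × Int) nm =>
    let info := pvRankInfo nm
    (acc.1 ++ [info.1], acc.2.1 + info.2.1, acc.2.2 + (if info.2.2 then 1 else 0))) ([], 0, 0)
  let infos := st.1
  let hard := st.2.1
  let aces := st.2.2
  let n := PySem.List.len infos
  if n = 0 then []
  else
    let value := if 0 < aces ∧ hard + 10 ≤ 21 then hard + 10 else hard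
    if n = 1 then (if 0 < aces then ['A'] else PySem.Int.toChars value)
    else if n = 2 ∧ PySem.List.pyGetD infos 0 [] = PySem.List.pyGetD infos 1 [] then
      PySem.List.pyGetD infos 0 [] ++ ',' :: PySem.List.pyGetD infos 0 []
    else if 0 < aces ∧ hard + 10 ≤ 21 then
      'A' :: ',' :: PySem.Int.toChars (value - 11)
    else PySem.Int.toChars value

def get_player_key_for_strategy_alt (card_names : List String) : String :=
  String.ofList (pvKeyB (card_names.map String.toList))

-- ===== PRECONDITION & SPEC =====
-- A's two-card "A,x" branch fires on an uppercase-'A' second character, which its own card-value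
-- helper counts as 0 (no ace): on two-card hands with no real ace ('a') and exactly one rank
-- character 'A', A returns a soft-style key "A,<other rank>" while B returns the hard total,
-- the intended key since the hand contains no ace.
def pvIsDiffHand (cs : List String) : Bool :=
  match cs with
  | [c0, c1] =>
    (c0.toList[1]? != some 'a') && (c1.toList[1]? != some 'a') &&
      ((c0.toList[1]? == some 'A') != (c1.toList[1]? == some 'A'))
  | _ => false

def D_get_player_key_for_strategy (card_names : List String) : Prop :=
  pvIsDiffHand card_names = true
instance (card_names : List String) : Decidable (D_get_player_key_for_strategy card_names) := by
  unfold D_get_player_key_for_strategy; infer_instance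

def Spec_get_player_key_for_strategy (card_names : List String) (out : String) : Prop :=
  ¬ D_get_player_key_for_strategy card_names → out = get_player_key_for_strategy_alt card_names
instance (card_names : List String) (out : String) : Decidable (Spec_get_player_key_for_strategy card_names out) := by
  unfold Spec_get_player_key_for_strategy; infer_instance

def pvDiffWitness_get_player_key_for_strategy : List String := ["xA", "x7"]
def pvDiffWitnessOut_get_player_key_for_strategy : String × String := ("A,7", "7")

-- ===== CLAIM (what is proved, stated in full; the proofs are below) =====
def Claim_unchanged_get_player_key_for_strategy : Prop := ∀ (card_names : List String), Dom_get_player_key_for_strategy card_names → Spec_get_player_key_for_strategy card_names (get_player_key_for_strategy card_names)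
def Claim_changed_get_player_key_for_strategy : Prop := Dom_get_player_key_for_strategy (pvDiffWitness_get_player_key_for_strategy) ∧ D_get_player_key_for_strategy (pvDiffWitness_get_player_key_for_strategy) ∧ get_player_key_for_strategy (pvDiffWitness_get_player_key_for_strategy) = pvDiffWitnessOut_get_player_key_for_strategy.1 ∧ get_player_key_for_strategy_alt (pvDiffWitness_get_player_key_for_strategy) = pvDiffWitnessOut_get_player_key_for_strategy.2 ∧ pvDiffWitnessOut_get_player_key_for_strategy.1 ≠ pvDiffWitnessOut_get_player_key_for_strategy.2
def Claim_exact_get_player_key_for_strategy : Prop := ∀ (card_names : List String), Dom_get_player_key_for_strategy card_names → D_get_player_key_for_strategy card_names → get_player_key_for_strategy card_names ≠ get_player_key_for_strategy_alt card_names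

-- ===== LEMMAS AND PROOFS =====

-- rank-level value, used only by the proofs to state the per-character table
def pvRVal (c : Char) : Int :=
  if c ∈ ['t', 'j', 'q', 'k'] then 10
  else if c = 'a' then 11
  else (PySem.Int.ofChars? [c]).getD 0

lemma pvCharTable : ∀ m : Nat, m < 127 →
    0 ≤ pvRVal (Char.ofNat m) ∧ (Char.ofNat m ≠ 'a' → pvRVal (Char.ofNat m) ≤ 10) := by decide

lemma pvCharLt127 (c : Char) (h : pvDomChar c = true) : c.toNat < 127 := by
  simp [pvDomChar] at h; omega

lemma pvRVal_facts (c : Char) (h : pvDomChar c = true) :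
    0 ≤ pvRVal c ∧ (c ≠ 'a' → pvRVal c ≤ 10) := by
  have := pvCharTable c.toNat (pvCharLt127 c h)
  rwa [Char.ofNat_toNat] at this

lemma pvDigitHead : ∀ m : Nat, m < 21 → ¬ ((PySem.Int.toChars (m : Int)).head? = some 'A') := by decide

-- per-card sums used to characterise both folds
def pvHardOf (names : List (List Char)) : Int :=
  (names.map (fun nm => if pvCardNum nm = 11 then (1 : Int) else pvCardNum nm)).sum
def pvAcesOf (names : List (List Char)) : Int :=
  (names.map (fun nm => if pvCardNum nm = 11 then (1 : Int) else 0)).sum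

lemma pvGet1 (nm : List Char) : PySem.List.pyGet? nm 1 = nm[1]? := by
  have h := PySem.List.pyGet?_of_nonneg (xs := nm) (i := 1) (by norm_num)
  rw [h]; rfl

-- everything the branch analysis needs about one card
lemma pvCard_facts (nm : List Char) (h : nm.all pvDomChar = true) :
    pvRankInfo nm = (pvCardStr nm, (if pvCardNum nm = 11 then 1 else pvCardNum nm),
      decide (pvCardNum nm = 11))
    ∧ 0 ≤ pvCardNum nm
    ∧ (if pvCardNum nm = 11 then (1 : Int) else pvCardNum nm) ≤ 10
    ∧ (pvCardNum nm = 11 ↔ nm[1]? = some 'a') := by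
  by_cases hl : nm.length < 2
  · have hnone : nm[1]? = none := by
      rw [List.getElem?_eq_none_iff]; omega
    simp only [pvRankInfo, pvCardNum, pvCardStr, pvGet1, hnone, PySem.List.len_eq]
    have h2 : ((nm.length : Int) < 2) := by omega
    simp [h2]
  · have h1 : 1 < nm.length := by omega
    have hc : nm[1]? = some nm[1] := List.getElem?_eq_getElem h1
    have hmem : nm[1] ∈ nm := List.getElem_mem h1
    have hdc : pvDomChar nm[1] = true := by
      rw [List.all_eq_true] at h; exact h _ hmem
    have hrv := pvRVal_facts nm[1] hdc
    have hne : ¬ (nm = [] ∨ PySem.List.len nm < 2) := by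
      simp [PySem.List.len_eq]
      constructor
      · intro hnil; rw [hnil] at h1; simp at h1
      · omega
    have hlen2 : ¬ (PySem.List.len nm < 2) := by simp [PySem.List.len_eq]; omega
    have hg : ¬(nm = [] ∨ nm.length ≤ 1) := by
      rintro (rfl | hh)
      · simp at h1
      · omega
    rw [pvRankInfo, pvCardNum, pvCardStr, if_neg hne, if_neg hlen2, pvGet1, hc]
    by_cases ht : nm[1] ∈ ['t', 'j', 'q', 'k']
    · have : nm[1] ≠ 'a' := by intro he; rw [he] at ht; exact absurd ht (by decide)
      simp [ht, this, hg]
    · by_cases ha : nm[1] = 'a'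
      · simp [ha, hg]
      · have hv : pvRVal nm[1] = (PySem.Int.ofChars? [nm[1]]).getD 0 := by
          rw [pvRVal, if_neg ht, if_neg ha]
        have h10 : (PySem.Int.ofChars? [nm[1]]).getD 0 ≤ 10 := by
          rw [← hv]; exact hrv.2 ha
        have h0 : 0 ≤ (PySem.Int.ofChars? [nm[1]]).getD 0 := by rw [← hv]; exact hrv.1
        cases hof : PySem.Int.ofChars? [nm[1]] with
        | none => simp [ht, ha, hof, hg]
        | some v =>
          rw [hof] at h10 h0
          simp only [Option.getD_some] at h10 h0
          have hv11 : v ≠ 11 := by omega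
          simp [ht, ha, hof, hg, hv11]
          omega

lemma pvFoldA_eq (names : List (List Char)) : ∀ (t0 a0 : Int),
    names.foldl (fun (acc : Int × Int) nm =>
      let v := pvCardNum nm
      let na := if v = 11 then acc.2 + 1 else acc.2
      (acc.1 + v, na)) (t0, a0)
    = (t0 + (names.map pvCardNum).sum, a0 + pvAcesOf names) := by
  induction names with
  | nil => intro t0 a0; simp [pvAcesOf]
  | cons nm tl ih =>
    intro t0 a0
    simp only [List.foldl_cons, List.map_cons, List.sum_cons, pvAcesOf]
    rw [ih]
    by_cases h : pvCardNum nm = 11 <;> simp [h, pvAcesOf, Prod.mk.injEq] <;> try omega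

lemma pvSum_split (names : List (List Char)) :
    (names.map pvCardNum).sum = pvHardOf names + 10 * pvAcesOf names := by
  induction names with
  | nil => simp [pvHardOf, pvAcesOf]
  | cons nm tl ih =>
    simp only [List.map_cons, List.sum_cons, pvHardOf, pvAcesOf] at *
    by_cases h : pvCardNum nm = 11 <;> simp [h] <;> omega

lemma pvNonAces_eq (names : List (List Char)) :
    ((names.filter (fun nm => pvCardNum nm != 11)).map (fun nm => pvCardNum nm)).sum
      = pvHardOf names - pvAcesOf names := by
  induction names with
  | nil => simp [pvHardOf, pvAcesOf]
  | cons nm tl ih =>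
    simp only [pvHardOf, pvAcesOf, List.map_cons, List.sum_cons] at *
    by_cases h : pvCardNum nm = 11 <;> simp [h] <;> omega

lemma pvAces_bounds (names : List (List Char)) (h : ∀ nm ∈ names, nm.all pvDomChar = true) :
    0 ≤ pvAcesOf names ∧ pvAcesOf names ≤ pvHardOf names := by
  induction names with
  | nil => simp [pvHardOf, pvAcesOf]
  | cons nm tl ih =>
    have hf := pvCard_facts nm (h nm (by simp))
    have htl := ih (fun x hx => h x (by simp [hx]))
    simp only [pvHardOf, pvAcesOf, List.map_cons, List.sum_cons] at *
    by_cases hc : pvCardNum nm = 11 <;> simp [hc] at hf ⊢ <;> omega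

lemma pvAdjust_cf : ∀ (k : Nat) (h : Int), (k : Int) ≤ h →
    pvAdjust (h + 10 * k) k = if (0 : Int) < (k : Int) ∧ h + 10 ≤ 21 then h + 10 else h := by
  intro k
  induction k with
  | zero => intro h _; rw [pvAdjust]; simp
  | succ k ih =>
    intro h hk
    rw [pvAdjust]
    by_cases hgt : 21 < h + 10 * ((k : Int) + 1)
    · rw [if_pos (by push_cast; constructor <;> omega)]
      have : h + 10 * ((k : Int) + 1) - 10 = h + 10 * (k : Int) := by ring
      push_cast
      rw [show h + 10 * ((k : Int) + 1) - 10 = h + 10 * (k : Int) by ring,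
        show (k : Int) + 1 - 1 = (k : Int) by ring, ih h (by push_cast at hk; omega)]
      by_cases hk0 : 0 < (k : Int) <;> by_cases h21 : h + 10 ≤ 21 <;>
        simp [h21] <;> omega
    · rw [if_neg (by push_cast; omega)]
      push_cast at hk ⊢
      have hkcase : (k : Int) = 0 ∨ 1 ≤ (k : Int) := by omega
      rcases hkcase with h0 | h1
      · rw [if_pos ⟨by omega, by omega⟩]; omega
      · omega

lemma pvCalc_eq (names : List (List Char)) (h : ∀ nm ∈ names, nm.all pvDomChar = true) :
    pvCalcHandValue names =
      if 0 < pvAcesOf names ∧ pvHardOf names + 10 ≤ 21 then pvHardOf names + 10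
      else pvHardOf names := by
  have hb := pvAces_bounds names h
  rw [pvCalcHandValue]
  simp only []
  rw [pvFoldA_eq, pvSum_split]
  simp only [zero_add]
  have hk : pvAcesOf names = ((pvAcesOf names).toNat : Int) := by omega
  rw [hk, pvAdjust_cf (pvAcesOf names).toNat (pvHardOf names) (by omega)]

lemma pvFoldB_eq (names : List (List Char)) (h : ∀ nm ∈ names, nm.all pvDomChar = true) :
    ∀ (is : List (List Char)) (h0 a0 : Int),
    names.foldl (fun (acc : List (List Char) × Int × Int) nm =>
      let info := pvRankInfo nm
      (acc.1 ++ [info.1], acc.2.1 + info.2.1, acc.2.2 + (if info.2.2 then 1 else 0)))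
      (is, h0, a0)
    = (is ++ names.map pvCardStr, h0 + pvHardOf names, a0 + pvAcesOf names) := by
  induction names with
  | nil => intro is h0 a0; simp [pvHardOf, pvAcesOf]
  | cons nm tl ih =>
    intro is h0 a0
    have hf := (pvCard_facts nm (h nm (by simp))).1
    simp only [List.foldl_cons, hf]
    rw [ih (fun x hx => h x (by simp [hx]))]
    by_cases hc : pvCardNum nm = 11 <;>
      simp [pvHardOf, pvAcesOf, hc, Prod.mk.injEq, List.append_assoc] <;> try omega

-- the D_ condition transported to the List Char level
def pvDL (names : List (List Char)) : Prop :=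
  match names with
  | [n0, n1] => n0[1]? ≠ some 'a' ∧ n1[1]? ≠ some 'a' ∧
      ((n0[1]? = some 'A') ↔ ¬ (n1[1]? = some 'A'))
  | _ => False

lemma pvD_iff (cs : List String) :
    D_get_player_key_for_strategy cs ↔ pvDL (cs.map String.toList) := by
  unfold D_get_player_key_for_strategy pvIsDiffHand pvDL
  match cs with
  | [] => simp
  | [a] => simp
  | a :: b :: c :: t => simp
  | [a, b] =>
    simp only [List.map_cons, List.map_nil]
    by_cases h0 : a.toList[1]? = some 'A' <;> by_cases h1 : b.toList[1]? = some 'A' <;>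
      simp [h0, h1]

lemma pvGetD1 {α : Type} (x y : α) (l : List α) (d : α) :
    PySem.List.pyGetD (x :: y :: l) 1 d = y := by
  have h := PySem.List.pyGetD_eq_getElem (xs := x :: y :: l) (i := 1) (d := d)
    (by norm_num) (by simp)
  simpa using h

lemma pvStrA_cases (nm : List Char) (h : pvCardStr nm = ['A']) :
    nm[1]? = some 'a' ∨ nm[1]? = some 'A' := by
  unfold pvCardStr at h
  by_cases hg : nm = [] ∨ PySem.List.len nm < 2
  · rw [if_pos hg] at h; exact absurd h (by simp)
  · rw [if_neg hg] at h
    cases hc : nm[1]? with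
    | none => simp only [pvGet1, hc] at h; exact absurd h (by simp)
    | some c =>
      simp only [pvGet1, hc] at h
      by_cases ht : c ∈ ['t', 'j', 'q', 'k']
      · rw [if_pos ht] at h; exact absurd h (by simp)
      · rw [if_neg ht] at h
        by_cases ha : c = 'a'
        · left; rw [ha]
        · rw [if_neg ha] at h
          simp only [List.cons.injEq, and_true] at h
          right; rw [h]

lemma pvStrA_of_A (nm : List Char) (h : nm[1]? = some 'A') : pvCardStr nm = ['A'] := by
  have hlen : 1 < nm.length := by
    by_contra hl
    rw [List.getElem?_eq_none_iff.2 (by omega)] at h; simp at h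
  have hg : ¬ (nm = [] ∨ PySem.List.len nm < 2) := by
    simp [PySem.List.len_eq]
    refine ⟨?_, by omega⟩
    intro hnil; rw [hnil] at hlen; simp at hlen
  unfold pvCardStr
  rw [if_neg hg]
  simp only [pvGet1, h]
  rw [if_neg (by decide), if_neg (by decide)]

lemma pvTwoSoft (n0 n1 : List Char) (hd0 : n0.all pvDomChar = true)
    (hd1 : n1.all pvDomChar = true)
    (hace : pvCardNum n0 = 11 ∨ pvCardNum n1 = 11) :
    0 < pvAcesOf [n0, n1] ∧ pvHardOf [n0, n1] + 10 ≤ 21 := by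
  have hf0 := pvCard_facts n0 hd0
  have hf1 := pvCard_facts n1 hd1
  have hb0 := hf0.2.2.1
  have hb1 := hf1.2.2.1
  have hn0 := hf0.2.1
  have hn1 := hf1.2.1
  simp only [pvAcesOf, pvHardOf, List.map_cons, List.map_nil, List.sum_cons,
    List.sum_nil]
  by_cases h0 : pvCardNum n0 = 11 <;> by_cases h1 : pvCardNum n1 = 11 <;>
    simp [h0, h1] at hb0 hb1 hace ⊢ <;> omega

lemma pvKey_eq (names : List (List Char)) (hdom : ∀ nm ∈ names, nm.all pvDomChar = true)
    (hnd : ¬ pvDL names) : pvKeyA names = pvKeyB names := by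
  match names with
  | [] => rfl
  | [n0] =>
    have hf := pvCard_facts n0 (hdom n0 (by simp))
    rw [pvKeyA, pvKeyB]
    simp only [List.foldl_cons, List.foldl_nil, hf.1, PySem.List.len_eq, List.nil_append]
    by_cases hv : pvCardNum n0 = 11
    · simp [PySem.List.pyGetD_zero_cons, hv]
    · simp [PySem.List.pyGetD_zero_cons, hv]
  | n0 :: n1 :: tl =>
    have hd0 := hdom n0 (by simp)
    have hd1 := hdom n1 (by simp)
    have hf0 := pvCard_facts n0 hd0
    have hf1 := pvCard_facts n1 hd1
    have hB := pvFoldB_eq (n0 :: n1 :: tl) hdom [] 0 0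
    have hAdef : ((n0 :: n1 :: tl).map (fun nm => if pvCardNum nm = 11 then (1 : Int) else 0)).sum
        = pvAcesOf (n0 :: n1 :: tl) := rfl
    rw [pvKeyA, pvKeyB, hB]
    simp only [pvCalc_eq (n0 :: n1 :: tl) hdom, hAdef, pvNonAces_eq]
    simp only [List.nil_append, zero_add, PySem.List.len_eq,
      List.map_cons, PySem.List.pyGetD_zero_cons, pvGetD1]
    set H := pvHardOf (n0 :: n1 :: tl) with hHdef
    set Ac := pvAcesOf (n0 :: n1 :: tl) with hAcdef
    by_cases h2 : tl = []
    · subst h2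
      by_cases hp : pvCardStr n0 = pvCardStr n1
      · simp [hp]
      · by_cases hs : 0 < Ac ∧ H + 10 ≤ 21
        · have hca : H - Ac + Ac < H + 10 := by omega
          have hca' : H < H + 10 := by omega
          simp [hp, hs, hca']
        · by_cases hA0 : pvCardStr n0 = ['A']
          · exfalso
            rcases pvStrA_cases n0 hA0 with ha | hA
            · refine hs ?_
              rw [hAcdef, hHdef]
              exact pvTwoSoft n0 n1 hd0 hd1 (Or.inl (hf0.2.2.2.2 ha))
            · by_cases hb1 : n1[1]? = some 'a'
              · refine hs ?_
                rw [hAcdef, hHdef]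
                exact pvTwoSoft n0 n1 hd0 hd1 (Or.inr (hf1.2.2.2.2 hb1))
              · by_cases hB1 : n1[1]? = some 'A'
                · exact hp (by rw [hA0, pvStrA_of_A n1 hB1])
                · exact hnd (by
                    simp only [pvDL]
                    exact ⟨(by rw [hA]; simp), hb1, (by simp [hA, hB1])⟩)
          · by_cases hA1 : pvCardStr n1 = ['A']
            · exfalso
              rcases pvStrA_cases n1 hA1 with ha | hA
              · refine hs ?_
                rw [hAcdef, hHdef]
                exact pvTwoSoft n0 n1 hd0 hd1 (Or.inr (hf1.2.2.2.2 ha))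
              · by_cases hb0 : n0[1]? = some 'a'
                · refine hs ?_
                  rw [hAcdef, hHdef]
                  exact pvTwoSoft n0 n1 hd0 hd1 (Or.inl (hf0.2.2.2.2 hb0))
                · by_cases hB0 : n0[1]? = some 'A'
                  · exact hp (by rw [hA1, pvStrA_of_A n0 hB0])
                  · exact hnd (by
                      simp only [pvDL]
                      exact ⟨hb0, (by rw [hA]; simp), (by simp [hA, hB0])⟩)
            · simp [hp, hs, hA0, hA1]
    · have hlen0 : tl.length ≠ 0 := fun h => h2 (List.length_eq_zero_iff.1 h)
      have hm2 : ¬ ((tl.length : Int) + 1 + 1 = 2) := by omega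
      have hz0 : ¬ ((tl.length : Int) + 1 + 1 = 0) := by omega
      have hz1 : ¬ ((tl.length : Int) + 1 = 0) := by omega
      by_cases hs : 0 < Ac ∧ H + 10 ≤ 21
      · have hca : H - Ac + Ac < H + 10 := by omega
        have hca' : H < H + 10 := by omega
        simp [hm2, hz0, hz1, hs, hca']
      · simp [hm2, hz0, hz1, hs]

lemma pvTight_core (m0 m1 : List Char) (hd0 : m0.all pvDomChar = true)
    (hd1 : m1.all pvDomChar = true) (hDL : pvDL [m0, m1]) :
    pvKeyA [m0, m1] ≠ pvKeyB [m0, m1] := by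
  obtain ⟨h0a, h1a, hxor⟩ := hDL
  have hdl : ∀ nm ∈ [m0, m1], nm.all pvDomChar = true := by
    intro nm hnm
    simp only [List.mem_cons, List.not_mem_nil, or_false] at hnm
    rcases hnm with rfl | rfl
    · exact hd0
    · exact hd1
  have hf0 := pvCard_facts m0 hd0
  have hf1 := pvCard_facts m1 hd1
  have hc0 : ¬ pvCardNum m0 = 11 := fun h => h0a (hf0.2.2.2.1 h)
  have hc1 : ¬ pvCardNum m1 = 11 := fun h => h1a (hf1.2.2.2.1 h)
  have hb0 := hf0.2.2.1
  have hb1 := hf1.2.2.1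
  have hn0 := hf0.2.1
  have hn1 := hf1.2.1
  rw [if_neg hc0] at hb0
  rw [if_neg hc1] at hb1
  have hAc : pvAcesOf [m0, m1] = 0 := by simp [pvAcesOf, hc0, hc1]
  have hHv : pvHardOf [m0, m1] = pvCardNum m0 + pvCardNum m1 := by
    simp [pvHardOf, hc0, hc1]
  have hB := pvFoldB_eq [m0, m1] hdl [] 0 0
  have hAdef : (([m0, m1]).map (fun nm => if pvCardNum nm = 11 then (1 : Int) else 0)).sum
      = pvAcesOf [m0, m1] := rfl
  rw [pvKeyA, pvKeyB, hB]
  simp only [pvCalc_eq [m0, m1] hdl, hAdef, pvNonAces_eq]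
  simp only [List.nil_append, zero_add, PySem.List.len_eq,
    List.map_cons, PySem.List.pyGetD_zero_cons, pvGetD1, hAc, hHv]
  have hhead : ∀ l : List Char,
      ¬ ('A' :: ',' :: l) = PySem.Int.toChars (pvCardNum m0 + pvCardNum m1) := by
    intro l heq
    have hH : pvCardNum m0 + pvCardNum m1 =
        (((pvCardNum m0 + pvCardNum m1).toNat : Nat) : Int) := by omega
    have hh := congrArg List.head? heq
    rw [hH] at hh
    exact pvDigitHead (pvCardNum m0 + pvCardNum m1).toNat (by omega) hh.symm
  by_cases hA0 : m0[1]? = some 'A'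
  · have hB1 : ¬ (m1[1]? = some 'A') := hxor.1 hA0
    have hs0 : pvCardStr m0 = ['A'] := pvStrA_of_A m0 hA0
    have hs1 : ¬ (pvCardStr m1 = ['A']) := by
      intro h
      rcases pvStrA_cases m1 h with h' | h'
      · exact h1a h'
      · exact hB1 h'
    have hnp : ¬ (pvCardStr m0 = pvCardStr m1) := by
      intro hpq; exact hs1 (by rw [← hpq, hs0])
    have hnp2 : ¬ ((['A'] : List Char) = pvCardStr m1) := fun hq => hs1 hq.symm
    simp [hnp2, hs0, hhead]
  · have hA1 : m1[1]? = some 'A' := by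
      by_contra hB1
      exact hA0 (hxor.2 hB1)
    have hs1 : pvCardStr m1 = ['A'] := pvStrA_of_A m1 hA1
    have hs0 : ¬ (pvCardStr m0 = ['A']) := by
      intro h
      rcases pvStrA_cases m0 h with h' | h'
      · exact h0a h'
      · exact hA0 h'
    have hnp : ¬ (pvCardStr m0 = pvCardStr m1) := by
      intro hpq; exact hs0 (by rw [hpq, hs1])
    have hnp2 : ¬ (pvCardStr m0 = (['A'] : List Char)) := hs0
    simp [hnp2, hs1, hhead]

-- ===== VERDICT (by name: the statement is the Claim_ definition above) =====
theorem get_player_key_for_strategy_spec : Claim_unchanged_get_player_key_for_strategy := by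
  intro cs hdom hnd
  unfold get_player_key_for_strategy get_player_key_for_strategy_alt
  have hdom' : ∀ nm ∈ cs.map String.toList, nm.all pvDomChar = true := by
    intro nm hnm
    rcases List.mem_map.1 hnm with ⟨s, hs, rfl⟩
    unfold Dom_get_player_key_for_strategy at hdom
    rw [List.all_eq_true] at hdom
    exact hdom s hs
  exact congrArg String.ofList
    (pvKey_eq (cs.map String.toList) hdom' (fun h => hnd ((pvD_iff cs).2 h)))

theorem get_player_key_for_strategy_changed : Claim_changed_get_player_key_for_strategy := by
  unfold Claim_changed_get_player_key_for_strategy; decide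

theorem get_player_key_for_strategy_tight : Claim_exact_get_player_key_for_strategy := by
  intro cs hdom hD
  have hDL := (pvD_iff cs).1 hD
  match cs with
  | [] => exact absurd hDL (by simp [pvDL])
  | [c] => exact absurd hDL (by simp [pvDL])
  | c0 :: c1 :: c2 :: t => exact absurd hDL (by simp [pvDL])
  | [c0, c1] =>
    have hdom' : ∀ s ∈ [c0, c1], (String.toList s).all pvDomChar = true := by
      intro s hs
      unfold Dom_get_player_key_for_strategy at hdom
      rw [List.all_eq_true] at hdom
      exact hdom s hs
    intro heq
    have hlist : pvKeyA [c0.toList, c1.toList] = pvKeyB [c0.toList, c1.toList] := by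
      have hh := congrArg String.toList heq
      simpa [get_player_key_for_strategy, get_player_key_for_strategy_alt,
        String.toList_ofList] using hh
    exact pvTight_core c0.toList c1.toList (hdom' c0 (by simp)) (hdom' c1 (by simp))
      (by simpa using hDL) hlist
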